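-- pv_equiv track=rewrite | github.com/wsbuck/cryptopals | set1/challenge6.py | calc_metric
-- ===== SOURCE A (Python) =====
-- def calc_metric(blocks):
--     metric = 0
--     common = ['e', 't', 'a', 'o', 'i', 'n', 's',
--               'h', 'r', 'd', 'l', 'u', ' ']
--     common = [ord(c_i) for c_i in common]
--     for byte in blocks:
--         if byte in common:
--             metric += 1
--     return metric
-- ===== SOURCE B (Python) =====
-- from collections import Counter
--
-- def calc_metric(blocks):
--     counts = Counter(blocks)
--     return sum(counts[ord(c)] for c in
--                ['e', 't', 'a', 'o', 'i', 'n', 's',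
--                 'h', 'r', 'd', 'l', 'u', ' '])
-- ===== Notes on version B (the rewrite author's own statement) =====
-- stated objective: alternative
-- what changed: B builds a byte histogram once with collections.Counter and then sums the counts of the 13 common character codes, instead of testing each byte against the common list inside the loop.
import Mathlib
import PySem

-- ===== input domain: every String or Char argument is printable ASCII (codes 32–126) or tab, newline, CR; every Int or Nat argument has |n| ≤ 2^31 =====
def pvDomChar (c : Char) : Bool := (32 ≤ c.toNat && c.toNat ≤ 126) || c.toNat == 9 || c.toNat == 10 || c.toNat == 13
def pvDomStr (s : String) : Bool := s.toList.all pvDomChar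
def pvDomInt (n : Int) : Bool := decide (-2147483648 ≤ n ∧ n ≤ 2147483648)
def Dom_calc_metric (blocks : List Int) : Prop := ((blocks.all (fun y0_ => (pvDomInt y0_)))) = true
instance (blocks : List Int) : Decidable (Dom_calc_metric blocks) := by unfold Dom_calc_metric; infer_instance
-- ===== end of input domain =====

-- B builds a Counter histogram once and sums the counts of the 13 common codes; A tests each byte against the list inside the loop (alternative decomposition).

-- ===== PORT A =====
-- common = [ord(c) for c in ['e','t','a','o','i','n','s','h','r','d','l','u',' ']]
def pvCommonA : List Int := [101, 116, 97, 111, 105, 110, 115, 104, 114, 100, 108, 117, 32]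

def calc_metric (blocks : List Int) : Int :=
  blocks.foldl (fun metric byte => if byte ∈ pvCommonA then metric + 1 else metric) 0

-- ===== PORT B =====
-- sum(counts[ord(c)] for c in ['e','t','a','o','i','n','s','h','r','d','l','u',' '])
def calc_metric_alt (blocks : List Int) : Int :=
  let counts := PySem.Dict.counter blocks
  ((['e', 't', 'a', 'o', 'i', 'n', 's', 'h', 'r', 'd', 'l', 'u', ' '] : List Char).map
    (fun c => counts.getD (c.toNat : Int) 0)).sum

-- ===== PRECONDITION & SPEC =====
def Spec_calc_metric (blocks : List Int) (out : Int) : Prop := out = calc_metric_alt blocks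
instance (blocks : List Int) (out : Int) : Decidable (Spec_calc_metric blocks out) := by unfold Spec_calc_metric; infer_instance

-- ===== CLAIM (what is proved, stated in full; the proofs are below) =====
def Claim_equal_calc_metric : Prop := ∀ (blocks : List Int), Dom_calc_metric blocks → Spec_calc_metric blocks (calc_metric blocks)

-- ===== LEMMAS AND PROOFS =====
-- Sum of an indicator over a duplicate-free list containing x is 1.
theorem sum_indicator_eq_one (l : List Int) (x : Int) (hnd : l.Nodup) (hx : x ∈ l) :
    (l.map (fun c => if c = x then (1:Int) else 0)).sum = 1 := by
  induction l with
  | nil => simp at hx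
  | cons y l ih =>
    rcases List.mem_cons.mp hx with rfl | h
    · have hnot : x ∉ l := (List.nodup_cons.mp hnd).1
      simp only [List.map_cons, List.sum_cons, if_pos rfl]
      have hz : (l.map (fun c => if c = x then (1:Int) else 0)).sum = 0 := by
        apply List.sum_eq_zero
        intro z hz
        obtain ⟨c, hc, rfl⟩ := List.mem_map.mp hz
        simp only [ite_eq_right_iff]
        intro hcy; exact absurd (hcy ▸ hc) hnot
      rw [hz]; norm_num
    · have hy : y ≠ x := by rintro rfl; exact (List.nodup_cons.mp hnd).1 h
      simp only [List.map_cons, List.sum_cons, if_neg hy, zero_add]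
      exact ih (List.nodup_cons.mp hnd).2 h

-- For a duplicate-free list l, counting members of l in xs = summing per-element counts.
theorem countP_mem_eq_sum_count (l xs : List Int) (hnd : l.Nodup) :
    (xs.countP (fun b => decide (b ∈ l)) : Int) = (l.map (fun c => (xs.count c : Int))).sum := by
  induction xs with
  | nil => simp
  | cons x xs ih =>
    rw [List.countP_cons]
    have hmap : l.map (fun c => ((x :: xs).count c : Int))
        = l.map (fun c => (xs.count c : Int) + if c = x then 1 else 0) := by
      apply List.map_congr_left
      intro c _
      rw [List.count_cons]
      rcases eq_or_ne c x with rfl | hc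
      · simp
      · simp [hc, Ne.symm hc]
    rw [hmap, List.sum_map_add]
    by_cases hx : x ∈ l
    · rw [sum_indicator_eq_one l x hnd hx]
      simp only [hx, decide_true, if_true]
      push_cast
      omega
    · have hz : (l.map (fun c => if c = x then (1:Int) else 0)).sum = 0 := by
        apply List.sum_eq_zero
        intro z hz
        obtain ⟨c, hc, rfl⟩ := List.mem_map.mp hz
        simp only [ite_eq_right_iff]
        intro hcx; exact absurd (hcx ▸ hc) hx
      rw [hz]; norm_num
      simpa [hx] using ih

-- ===== VERDICT (by name: the statement is the Claim_ definition above) =====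
theorem calc_metric_spec : Claim_equal_calc_metric := by
  intro blocks _
  unfold Spec_calc_metric calc_metric calc_metric_alt
  rw [PySem.List.foldl_ite_add_one]
  simp only [PySem.Dict.getD_counter]
  have := countP_mem_eq_sum_count pvCommonA blocks (by decide)
  simpa [pvCommonA] using this
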